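-- pv_equiv track=rewrite | github.com/sdwr/cowprofit | generate_prices.py | prune_history
-- ===== SOURCE A (Python) =====
-- HISTORY_WINDOW = 7 * 24 * 60 * 60  # 7 days in seconds
--
-- def prune_list(entries, cutoff):
--     """
--     Keep entries within 7 days + 1 baseline entry beyond the window.
--     Returns list sorted newest-first.
--     """
--     if not entries:
--         return []
--
--     recent = [e for e in entries if e['t'] >= cutoff]
--     old = [e for e in entries if e['t'] < cutoff]
--
--     if old:
--         old.sort(key=lambda x: x['t'], reverse=True)
--         recent.append(old[0])
--
--     recent.sort(key=lambda x: x['t'], reverse=True)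
--     return recent
--
-- def prune_history(history, now_ts):
--     """Prune all history entries, dropping items with no remaining data."""
--     cutoff = now_ts - HISTORY_WINDOW
--     pruned = {}
--
--     for key, entry in history.items():
--         b_list = prune_list(entry.get('b', []), cutoff)
--         a_list = prune_list(entry.get('a', []), cutoff)
--         if b_list or a_list:
--             pruned[key] = {'b': b_list, 'a': a_list}
--
--     return pruned
-- ===== SOURCE B (Python) =====
-- HISTORY_WINDOW = 7 * 24 * 60 * 60  # 7 days in seconds
--
-- def prune_list(entries, cutoff):
--     """One descending sort, then a single walk that stops right after the
--     first entry older than the cutoff (the baseline)."""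
--     pruned = []
--     for e in sorted(entries, key=lambda x: x['t'], reverse=True):
--         pruned.append(e)
--         if e['t'] < cutoff:
--             break
--     return pruned
--
-- def prune_history(history, now_ts):
--     """Prune all history entries, dropping items with no remaining data."""
--     cutoff = now_ts - HISTORY_WINDOW
--     pruned = {}
--     for key, entry in history.items():
--         b_list = prune_list(entry.get('b', []), cutoff)
--         a_list = prune_list(entry.get('a', []), cutoff)
--         if b_list or a_list:
--             pruned[key] = {'b': b_list, 'a': a_list}
--     return pruned
-- ===== Notes on version B (the rewrite author's own statement) =====
-- stated objective: simpler
-- what changed: prune_list's two comprehensions, separate old-sort, conditional baseline append and final re-sort are replaced by one stable descending sort of all entries followed by a single early-terminating walk that keeps everything until (and including) the first entry older than the cutoff.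
-- outside the precondition, e.g. on prune_history({'x': {'b': [{}]}}, 0): A raises KeyError, B raises KeyError
import Mathlib
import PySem

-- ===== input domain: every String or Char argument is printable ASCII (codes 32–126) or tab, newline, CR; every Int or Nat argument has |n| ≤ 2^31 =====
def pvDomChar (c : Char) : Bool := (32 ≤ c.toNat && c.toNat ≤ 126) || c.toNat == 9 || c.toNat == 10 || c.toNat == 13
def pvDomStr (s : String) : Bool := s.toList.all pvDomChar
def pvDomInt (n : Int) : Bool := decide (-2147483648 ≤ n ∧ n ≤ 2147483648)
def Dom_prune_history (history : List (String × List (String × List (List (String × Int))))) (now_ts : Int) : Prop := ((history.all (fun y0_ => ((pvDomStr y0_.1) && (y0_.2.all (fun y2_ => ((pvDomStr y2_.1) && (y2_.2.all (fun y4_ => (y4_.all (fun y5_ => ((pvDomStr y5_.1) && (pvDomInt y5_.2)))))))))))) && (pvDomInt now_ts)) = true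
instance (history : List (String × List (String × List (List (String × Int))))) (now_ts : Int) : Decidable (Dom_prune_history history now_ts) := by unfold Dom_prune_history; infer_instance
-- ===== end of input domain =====

-- B: prune_list's two filters + old-sort + conditional baseline append + final re-sort become
-- one stable descending sort plus a single early-terminating walk (objective: simpler).


def pvHISTORY_WINDOW : Int := 7 * 24 * 60 * 60

-- e['t'] (total form; Pre_ requires the key to be present)
def pvT (e : List (String × Int)) : Int := (PySem.Dict.get? ⟨e⟩ "t").getD 0

-- ===== PORT A =====
def prune_list (entries : List (List (String × Int))) (cutoff : Int) : List (List (String × Int)) :=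
  if entries = [] then []
  else
    let recent := entries.filter (fun e => decide (cutoff ≤ pvT e))
    let old := entries.filter (fun e => decide (pvT e < cutoff))
    let recent2 :=
      match PySem.List.sorted old pvT true with
      | [] => recent
      | o :: _ => recent ++ [o]   -- old.sort(reverse); recent.append(old[0])
    PySem.List.sorted recent2 pvT true

def prune_history (history : List (String × List (String × List (List (String × Int))))) (now_ts : Int) : List (String × List (String × List (List (String × Int)))) :=
  let cutoff := now_ts - pvHISTORY_WINDOW
  history.foldl (fun pruned kv =>
    let b_list := prune_list (PySem.Dict.getD ⟨kv.2⟩ "b" []) cutoff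
    let a_list := prune_list (PySem.Dict.getD ⟨kv.2⟩ "a" []) cutoff
    if b_list ≠ [] ∨ a_list ≠ [] then (PySem.Dict.insert ⟨pruned⟩ kv.1 [("b", b_list), ("a", a_list)]).items else pruned) []

-- ===== PORT B =====
-- the walk: append each entry; stop right after the first one older than the cutoff
def pvWalk (cutoff : Int) : List (List (String × Int)) → List (List (String × Int)) → List (List (String × Int))
  | acc, [] => acc
  | acc, e :: rest => if pvT e < cutoff then acc ++ [e] else pvWalk cutoff (acc ++ [e]) rest

def prune_list_alt (entries : List (List (String × Int))) (cutoff : Int) : List (List (String × Int)) :=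
  pvWalk cutoff [] (PySem.List.sorted entries pvT true)

def prune_history_alt (history : List (String × List (String × List (List (String × Int))))) (now_ts : Int) : List (String × List (String × List (List (String × Int)))) :=
  let cutoff := now_ts - pvHISTORY_WINDOW
  history.foldl (fun pruned kv =>
    let b_list := prune_list_alt (PySem.Dict.getD ⟨kv.2⟩ "b" []) cutoff
    let a_list := prune_list_alt (PySem.Dict.getD ⟨kv.2⟩ "a" []) cutoff
    if b_list ≠ [] ∨ a_list ≠ [] then (PySem.Dict.insert ⟨pruned⟩ kv.1 [("b", b_list), ("a", a_list)]).items else pruned) []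

-- ===== PRECONDITION & SPEC =====
-- Pre_ excludes inputs where some entry dict lacks the key 't': there Python A (and B) raise KeyError.
def Pre_prune_history (history : List (String × List (String × List (List (String × Int))))) (now_ts : Int) : Prop :=
  ∀ kv ∈ history,
    (∀ e ∈ PySem.Dict.getD ⟨kv.2⟩ "b" ([] : List (List (String × Int))), (PySem.Dict.get? ⟨e⟩ "t").isSome = true) ∧
    (∀ e ∈ PySem.Dict.getD ⟨kv.2⟩ "a" ([] : List (List (String × Int))), (PySem.Dict.get? ⟨e⟩ "t").isSome = true)
instance (history : List (String × List (String × List (List (String × Int))))) (now_ts : Int) : Decidable (Pre_prune_history history now_ts) := by unfold Pre_prune_history; infer_instance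

def pvWitness_prune_history : (List (String × List (String × List (List (String × Int))))) × Int :=
  ([("cow", [("b", [[("t", 10)], [("t", -700000)]]), ("a", [])])], 0)

def Spec_prune_history (history : List (String × List (String × List (List (String × Int))))) (now_ts : Int) (out : List (String × List (String × List (List (String × Int))))) : Prop := out = prune_history_alt history now_ts
instance (history : List (String × List (String × List (List (String × Int))))) (now_ts : Int) (out : List (String × List (String × List (List (String × Int))))) : Decidable (Spec_prune_history history now_ts out) := by
  unfold Spec_prune_history
  haveI d1 : DecidableEq (List (String × Int)) := instDecidableEqList
  haveI d2 : DecidableEq (List (List (String × Int))) := instDecidableEqList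
  haveI d4 : DecidableEq (List (String × List (List (String × Int)))) := instDecidableEqList
  haveI d6 : DecidableEq (List (String × List (String × List (List (String × Int))))) := instDecidableEqList
  exact d6 out _

-- ===== CLAIM (what is proved, stated in full; the proofs are below) =====
def Claim_equal_prune_history : Prop := ∀ (history : List (String × List (String × List (List (String × Int))))) (now_ts : Int), Dom_prune_history history now_ts → Pre_prune_history history now_ts → Spec_prune_history history now_ts (prune_history history now_ts)

-- ===== LEMMAS AND PROOFS =====

-- the reverse-sort insertion relation
def pvBf : List (String × Int) → List (String × Int) → Bool := fun a b => decide (pvT b < pvT a)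

lemma pv_ins_left (cutoff : Int) (x : List (String × Int)) (A B : List (List (String × Int)))
    (hx : cutoff ≤ pvT x) (hB : ∀ b ∈ B, pvT b < cutoff) :
    PySem.List.insertBy pvBf x (A ++ B) = PySem.List.insertBy pvBf x A ++ B := by
  induction A with
  | nil =>
    cases B with
    | nil => rfl
    | cons b bs =>
      have : pvBf x b = true := by have := hB b (by simp); simp [pvBf]; omega
      simp [PySem.List.insertBy, this]
  | cons a as ih =>
    simp only [List.cons_append, PySem.List.insertBy]
    by_cases h : pvBf x a = true
    · simp [h]
    · simp only [h]; simp at h ⊢; rw [ih]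

lemma pv_ins_right (cutoff : Int) (x : List (String × Int)) (A B : List (List (String × Int)))
    (hx : pvT x < cutoff) (hA : ∀ a ∈ A, cutoff ≤ pvT a) :
    PySem.List.insertBy pvBf x (A ++ B) = A ++ PySem.List.insertBy pvBf x B := by
  induction A with
  | nil => rfl
  | cons a as ih =>
    have : pvBf x a = false := by have := hA a (by simp); simp [pvBf]; omega
    simp only [List.cons_append, PySem.List.insertBy, this]
    simp only [Bool.false_eq_true, if_false, List.cons.injEq, true_and]
    exact ih (fun a ha => hA a (by simp [ha]))

lemma pv_foldl_partition (cutoff : Int) (xs : List (List (String × Int)))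
    (A B : List (List (String × Int)))
    (hA : ∀ a ∈ A, cutoff ≤ pvT a) (hB : ∀ b ∈ B, pvT b < cutoff) :
    xs.foldl (fun acc x => PySem.List.insertBy pvBf x acc) (A ++ B)
      = (xs.filter (fun e => decide (cutoff ≤ pvT e))).foldl (fun acc x => PySem.List.insertBy pvBf x acc) A
        ++ (xs.filter (fun e => decide (pvT e < cutoff))).foldl (fun acc x => PySem.List.insertBy pvBf x acc) B := by
  induction xs generalizing A B with
  | nil => simp
  | cons x xs ih =>
    by_cases hx : cutoff ≤ pvT x
    · have hx2 : ¬ (pvT x < cutoff) := by omega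
      simp only [List.foldl_cons, List.filter_cons, hx, hx2, decide_true, decide_false,
        if_true, if_false, List.foldl_cons]
      rw [pv_ins_left cutoff x A B hx hB]
      exact ih _ B (fun a ha => ((PySem.List.mem_insertBy pvBf x a A).mp ha).elim
        (fun h => h ▸ hx) (fun h => hA a h)) hB
    · have hx2 : pvT x < cutoff := by omega
      simp only [List.foldl_cons, List.filter_cons, hx, hx2, decide_true, decide_false,
        if_true, if_false, List.foldl_cons]
      rw [pv_ins_right cutoff x A B hx2 hA]
      exact ih A _ hA (fun b hb => ((PySem.List.mem_insertBy pvBf x b B).mp hb).elim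
        (fun h => h ▸ hx2) (fun h => hB b h))

-- stable reverse sort splits along the cutoff
lemma pv_sorted_split (cutoff : Int) (xs : List (List (String × Int))) :
    PySem.List.sorted xs pvT true
      = PySem.List.sorted (xs.filter (fun e => decide (cutoff ≤ pvT e))) pvT true
        ++ PySem.List.sorted (xs.filter (fun e => decide (pvT e < cutoff))) pvT true := by
  rw [PySem.List.sorted_rev_eq_foldl_insertBy, PySem.List.sorted_rev_eq_foldl_insertBy,
    PySem.List.sorted_rev_eq_foldl_insertBy]
  exact pv_foldl_partition cutoff xs [] [] (by simp) (by simp)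

-- appending one strictly-older element sorts to the back
lemma pv_sorted_append_low (cutoff : Int) (R : List (List (String × Int))) (o : List (String × Int))
    (hR : ∀ r ∈ R, cutoff ≤ pvT r) (ho : pvT o < cutoff) :
    PySem.List.sorted (R ++ [o]) pvT true = PySem.List.sorted R pvT true ++ [o] := by
  rw [PySem.List.sorted_rev_eq_foldl_insertBy, List.foldl_append,
    ← PySem.List.sorted_rev_eq_foldl_insertBy]
  simp only [List.foldl_cons, List.foldl_nil]
  exact PySem.List.insertBy_of_forall_not_before _ _ _
    (fun y hy => by
      have : cutoff ≤ pvT y := hR y ((PySem.List.mem_sorted R pvT true y).mp hy)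
      simp only [pvBf, decide_eq_false_iff_not]; omega)

lemma pv_walk_split (cutoff : Int) (R O acc : List (List (String × Int)))
    (hR : ∀ r ∈ R, cutoff ≤ pvT r) (hO : ∀ b ∈ O, pvT b < cutoff) :
    pvWalk cutoff acc (R ++ O) = acc ++ R ++ O.take 1 := by
  induction R generalizing acc with
  | nil =>
    cases O with
    | nil => simp [pvWalk]
    | cons o os =>
      have : pvT o < cutoff := hO o (by simp)
      simp [pvWalk, this]
  | cons r rs ih =>
    have h1 : ¬ (pvT r < cutoff) := by have := hR r (by simp); omega
    simp only [List.cons_append, pvWalk, h1, if_false]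
    rw [ih (acc ++ [r]) (fun a ha => hR a (by simp [ha]))]
    simp

lemma pv_prune_list_eq (entries : List (List (String × Int))) (cutoff : Int) :
    prune_list entries cutoff = prune_list_alt entries cutoff := by
  unfold prune_list prune_list_alt
  by_cases h : entries = []
  · subst h; simp [pvWalk, PySem.List.sorted]
  · simp only [h, if_false]
    have hsplit := pv_sorted_split cutoff entries
    have hR : ∀ r ∈ PySem.List.sorted (entries.filter (fun e => decide (cutoff ≤ pvT e))) pvT true, cutoff ≤ pvT r := by
      intro r hr
      have := (PySem.List.mem_sorted _ pvT true r).mp hr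
      simpa using List.of_mem_filter this
    have hO : ∀ b ∈ PySem.List.sorted (entries.filter (fun e => decide (pvT e < cutoff))) pvT true, pvT b < cutoff := by
      intro b hb
      have := (PySem.List.mem_sorted _ pvT true b).mp hb
      simpa using List.of_mem_filter this
    rw [hsplit, pv_walk_split cutoff _ _ [] hR hO, List.nil_append]
    cases hcase : PySem.List.sorted (entries.filter (fun e => decide (pvT e < cutoff))) pvT true with
    | nil => simp
    | cons o os =>
      have ho : pvT o < cutoff := hO o (by rw [hcase]; simp)
      rw [pv_sorted_append_low cutoff _ o
        (fun r hr => by simpa using List.of_mem_filter hr) ho]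
      simp

lemma pv_prune_list_funext : prune_list = prune_list_alt :=
  funext fun entries => funext fun cutoff => pv_prune_list_eq entries cutoff

-- ===== VERDICT (by name: the statement is the Claim_ definition above) =====
theorem prune_history_spec : Claim_equal_prune_history := by
  intro history now_ts _hd _hp
  unfold Spec_prune_history prune_history prune_history_alt
  rw [pv_prune_list_funext]
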